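-- pv_equiv track=rewrite | github.com/Rycen7822/DeepScientist-hermes | vendor/deepscientist/gitops/diff.py | _normalize_patch_lines
-- ===== SOURCE A (Python) =====
-- def _normalize_patch_lines(patch: str) -> list[str]:
--     lines = [line.rstrip("\n") for line in patch.splitlines()]
--     if not lines:
--         return []
--     first_hunk = next((index for index, line in enumerate(lines) if line.startswith("@@")), None)
--     if first_hunk is None:
--         return lines
--     prefix = [line for line in lines[:first_hunk] if line.startswith("---") or line.startswith("+++")]
--     return prefix + lines[first_hunk:]
-- ===== SOURCE B (Python) =====
-- def _normalize_patch_lines(patch: str) -> list[str]: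
--     lines = [line.rstrip("\n") for line in patch.splitlines()]
--     seen_hunk = False
--     out = []
--     for line in lines:
--         if seen_hunk:
--             out.append(line)
--         elif line.startswith("@@"):
--             seen_hunk = True
--             out.append(line)
--         elif line.startswith("---") or line.startswith("+++"):
--             out.append(line)
--     return out if seen_hunk else lines
-- ===== Notes on version B (the rewrite author's own statement) =====
-- stated objective: simpler
-- what changed: Replaces the find-first-hunk-index + slice + filter + concatenate pipeline with a single linear pass maintaining a seen_hunk flag and one output list (falling back to the full line list when no hunk exists).
import Mathlib
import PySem

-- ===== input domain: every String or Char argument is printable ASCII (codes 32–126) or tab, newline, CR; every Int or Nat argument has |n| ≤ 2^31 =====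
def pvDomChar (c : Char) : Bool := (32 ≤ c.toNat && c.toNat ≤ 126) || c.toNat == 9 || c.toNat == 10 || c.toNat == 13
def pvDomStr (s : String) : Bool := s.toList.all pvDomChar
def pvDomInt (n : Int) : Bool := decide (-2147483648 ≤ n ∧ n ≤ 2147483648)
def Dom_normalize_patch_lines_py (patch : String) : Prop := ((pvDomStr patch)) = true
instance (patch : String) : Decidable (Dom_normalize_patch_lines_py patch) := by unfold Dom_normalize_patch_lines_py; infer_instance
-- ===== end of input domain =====

-- B replaces the find-first-hunk-index + slice + filter + concat pipeline by one
-- linear pass with a seen_hunk flag (objective: simpler decomposition; same cost).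
-- ===== PORT A =====
-- line.rstrip("\n"): hand port (drop trailing '\n' chars), exact on all strings
def pvRstripNl (line : String) : String :=
  String.ofList ((line.toList.reverse.dropWhile (fun c => c == '\n')).reverse)

def normalize_patch_lines_py (patch : String) : List String :=
  let lines := (PySem.Str.splitlines patch).map pvRstripNl
  if lines = [] then []
  else
    match (PySem.List.enumerate lines).find? (fun p => PySem.Str.startswith p.2 "@@") with
    | none => lines
    | some (i, _) =>
        ((PySem.List.slice lines none (some i)).filter
          (fun l => PySem.Str.startswith l "---" || PySem.Str.startswith l "+++"))
          ++ PySem.List.slice lines (some i) none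

-- ===== PORT B =====
def pvStepB (st : Bool × List String) (line : String) : Bool × List String :=
  if st.1 then (true, st.2 ++ [line])
  else if PySem.Str.startswith line "@@" then (true, st.2 ++ [line])
  else if PySem.Str.startswith line "---" || PySem.Str.startswith line "+++" then
    (st.1, st.2 ++ [line])
  else st

def normalize_patch_lines_py_alt (patch : String) : List String :=
  let lines := (PySem.Str.splitlines patch).map pvRstripNl
  let st := lines.foldl pvStepB (false, ([] : List String))
  if st.1 then st.2 else lines

-- ===== PRECONDITION & SPEC =====
def Spec_normalize_patch_lines_py (patch : String) (out : List String) : Prop := out = normalize_patch_lines_py_alt patch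
instance (patch : String) (out : List String) : Decidable (Spec_normalize_patch_lines_py patch out) := by unfold Spec_normalize_patch_lines_py; infer_instance

-- ===== CLAIM (what is proved, stated in full; the proofs are below) =====
def Claim_equal_normalize_patch_lines_py : Prop := ∀ (patch : String), Dom_normalize_patch_lines_py patch → Spec_normalize_patch_lines_py patch (normalize_patch_lines_py patch)

-- ===== LEMMAS AND PROOFS =====
theorem step_seen (acc : List String) (line : String) :
    pvStepB (true, acc) line = (true, acc ++ [line]) := by
  simp [pvStepB]

theorem step_hunk (acc : List String) (line : String)
    (h : PySem.Str.startswith line "@@" = true) :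
    pvStepB (false, acc) line = (true, acc ++ [line]) := by
  simp only [pvStepB, h]
  simp

theorem step_keep (acc : List String) (line : String)
    (h1 : PySem.Str.startswith line "@@" = false)
    (h2 : (PySem.Str.startswith line "---" || PySem.Str.startswith line "+++") = true) :
    pvStepB (false, acc) line = (false, acc ++ [line]) := by
  simp only [pvStepB, h1, h2]
  simp

theorem step_skip (acc : List String) (line : String)
    (h1 : PySem.Str.startswith line "@@" = false)
    (h2 : (PySem.Str.startswith line "---" || PySem.Str.startswith line "+++") = false) :
    pvStepB (false, acc) line = (false, acc) := by
  simp only [pvStepB, h1, h2]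
  simp

theorem foldB_seen (ls : List String) (acc : List String) :
    ls.foldl pvStepB (true, acc) = (true, acc ++ ls) := by
  induction ls generalizing acc with
  | nil => simp
  | cons h t ih => rw [List.foldl_cons, step_seen, ih]; simp

theorem foldB_no_hunk (ls : List String) (acc : List String)
    (h : ∀ l ∈ ls, PySem.Str.startswith l "@@" = false) :
    ls.foldl pvStepB (false, acc) =
      (false, acc ++ ls.filter (fun l => PySem.Str.startswith l "---" || PySem.Str.startswith l "+++")) := by
  induction ls generalizing acc with
  | nil => simp
  | cons x t ih =>
    have hx : PySem.Str.startswith x "@@" = false := h x (by simp)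
    have ht : ∀ l ∈ t, PySem.Str.startswith l "@@" = false := fun l hl => h l (by simp [hl])
    rcases hm : (PySem.Str.startswith x "---" || PySem.Str.startswith x "+++") with _ | _
    · rw [List.foldl_cons, step_skip _ _ hx hm, ih _ ht, List.filter_cons, hm]
      simp
    · rw [List.foldl_cons, step_keep _ _ hx hm, ih _ ht, List.filter_cons, hm]
      simp

theorem find?_enumerate_none (ls : List String) (s : Int)
    (h : ∀ l ∈ ls, PySem.Str.startswith l "@@" = false) :
    (PySem.List.enumerate ls s).find? (fun p => PySem.Str.startswith p.2 "@@") = none := by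
  induction ls generalizing s with
  | nil => simp [PySem.List.enumerate_nil]
  | cons x t ih =>
    have hx : PySem.Str.startswith x "@@" = false := h x (by simp)
    rw [PySem.List.enumerate_cons,
      List.find?_cons_of_neg (by simpa using hx),
      ih (s + 1) (fun l hl => h l (by simp [hl]))]

theorem find?_enumerate_split (pre : List String) (h0 : String) (t : List String) (s : Int)
    (hpre : ∀ l ∈ pre, PySem.Str.startswith l "@@" = false)
    (hh : PySem.Str.startswith h0 "@@" = true) :
    (PySem.List.enumerate (pre ++ h0 :: t) s).find? (fun p => PySem.Str.startswith p.2 "@@")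
      = some (s + pre.length, h0) := by
  induction pre generalizing s with
  | nil =>
    rw [List.nil_append, PySem.List.enumerate_cons,
      List.find?_cons_of_pos (by simpa using hh)]
    simp
  | cons x xs ih =>
    have hx : PySem.Str.startswith x "@@" = false := hpre x (by simp)
    rw [List.cons_append, PySem.List.enumerate_cons,
      List.find?_cons_of_neg (by simpa using hx),
      ih (s + 1) (fun l hl => hpre l (by simp [hl]))]
    congr 2
    simp only [List.length_cons]
    push_cast
    ring

theorem core_eq (ls : List String) :
    (if ls = [] then []
     else
       match (PySem.List.enumerate ls).find? (fun p => PySem.Str.startswith p.2 "@@") with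
       | none => ls
       | some (i, _) =>
           ((PySem.List.slice ls none (some i)).filter
             (fun l => PySem.Str.startswith l "---" || PySem.Str.startswith l "+++"))
             ++ PySem.List.slice ls (some i) none)
    = (let st := ls.foldl pvStepB (false, ([] : List String));
       if st.1 then st.2 else ls) := by
  rcases hd : ls.dropWhile (fun l => !PySem.Str.startswith l "@@") with _ | ⟨h0, t⟩
  · -- no line starts with "@@": A returns lines (or [] = lines), B's flag stays false
    have hall : ∀ l ∈ ls, PySem.Str.startswith l "@@" = false := by
      intro l hl
      have := List.dropWhile_eq_nil_iff.mp hd l hl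
      simpa using this
    rw [find?_enumerate_none ls 0 hall, foldB_no_hunk ls [] hall]
    by_cases hnil : ls = [] <;> simp [hnil]
  · -- ls = pre ++ h0 :: t with h0 the first "@@" line
    have hsplit : ls = ls.takeWhile (fun l => !PySem.Str.startswith l "@@") ++ h0 :: t := by
      conv_lhs => rw [← List.takeWhile_append_dropWhile
        (p := fun l => !PySem.Str.startswith l "@@") (l := ls)]
      rw [hd]
    set pre := ls.takeWhile (fun l => !PySem.Str.startswith l "@@") with hpredef
    have hpre : ∀ l ∈ pre, PySem.Str.startswith l "@@" = false := by
      intro l hl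
      have := List.mem_takeWhile_imp hl
      simpa using this
    have hh : PySem.Str.startswith h0 "@@" = true := by
      have := List.head?_dropWhile_not (fun l => !PySem.Str.startswith l "@@") ls
      rw [hd] at this
      simpa using this
    rw [hsplit, if_neg (by simp), find?_enumerate_split pre h0 t 0 hpre hh]
    have hfold : (pre ++ h0 :: t).foldl pvStepB (false, ([] : List String))
        = (true, pre.filter (fun l => PySem.Str.startswith l "---" || PySem.Str.startswith l "+++") ++ h0 :: t) := by
      rw [List.foldl_append, foldB_no_hunk pre [] hpre, List.foldl_cons,
        step_hunk _ _ hh, foldB_seen]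
      simp
    have hslice1 : PySem.List.slice (pre ++ h0 :: t) none (some ((0 : Int) + pre.length)) = pre := by
      have h1 : ((0 : Int) + (pre.length : Int)) = ((pre.length : Nat) : Int) := by ring
      rw [h1, PySem.List.slice_to_natCast, List.take_left]
    have hslice2 : PySem.List.slice (pre ++ h0 :: t) (some ((0 : Int) + pre.length)) none = h0 :: t := by
      have h1 : ((0 : Int) + (pre.length : Int)) = ((pre.length : Nat) : Int) := by ring
      rw [h1, PySem.List.slice_from_natCast, List.drop_left]
    simp only [hfold, hslice1, hslice2]
    simp

-- ===== VERDICT (by name: the statement is the Claim_ definition above) =====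
theorem normalize_patch_lines_py_spec : Claim_equal_normalize_patch_lines_py := by
  intro patch _
  unfold Spec_normalize_patch_lines_py normalize_patch_lines_py normalize_patch_lines_py_alt
  exact core_eq _
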